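-- pv_equiv track=rewrite | github.com/newtonsspawn/codewars_challenges | Python/6 kyu/Total Primes/gettotalprimes_02.py | gen_prime_digs
-- ===== SOURCE A (Python) =====
-- from itertools import product
--
-- def gen_prime_digs(a, b):
--     PRIMES = ['2', '3', '5', '7']
--     nums = []
--     for i in range(len(str(a)), len(str(b)) + 1):
--         for j in list(product(PRIMES, repeat=i)):
--             num = int(''.join(j))
--             if a <= num < b:
--                 nums.append(num)
--     return nums
-- ===== SOURCE B (Python) =====
-- def gen_prime_digs(a, b):
--     nums = []
--     layer = [0]
--     for _ in range(len(str(b))):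
--         layer = [10 * x + d for x in layer for d in (2, 3, 5, 7)]
--         nums += [x for x in layer if a <= x < b]
--     return nums
-- ===== Notes on version B (the rewrite author's own statement) =====
-- stated objective: alternative
-- what changed: Replaces the string-based itertools.product enumeration (build every digit tuple, join, int()-parse, digit lengths starting at len(str(a))) with purely arithmetic layer extension (layer -> 10*x+d) starting at one digit, filtering each layer.
-- outside the precondition, e.g. on gen_prime_digs(-1, 3): A returns [], B returns [2]; on gen_prime_digs(-5, 30): A returns [22, 23, 25, 27], B returns [2, 3, 5, 7, 22, 23, 25, 27]
import Mathlib
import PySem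

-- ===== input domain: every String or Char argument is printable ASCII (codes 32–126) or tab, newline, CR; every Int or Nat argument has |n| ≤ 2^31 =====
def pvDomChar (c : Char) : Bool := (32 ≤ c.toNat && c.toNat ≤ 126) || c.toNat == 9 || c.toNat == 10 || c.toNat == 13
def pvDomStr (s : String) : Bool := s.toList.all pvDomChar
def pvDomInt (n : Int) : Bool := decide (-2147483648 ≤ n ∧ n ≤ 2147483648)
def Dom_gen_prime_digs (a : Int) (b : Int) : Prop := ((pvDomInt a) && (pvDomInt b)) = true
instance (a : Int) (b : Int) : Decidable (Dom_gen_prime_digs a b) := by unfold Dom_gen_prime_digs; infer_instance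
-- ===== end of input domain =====

-- B replaces A's string-based itertools.product enumeration (join + int() per candidate,
-- starting at len(str(a)) digits) by purely arithmetic layer extension (x -> 10*x+d) from
-- length 1, filtering each layer; objective: alternative (no string building or parsing).


-- ===== PORT A =====
-- itertools.product(primes, repeat=n), in Python's order (the last coordinate varies fastest)
def pvProduct (primes : List String) : Nat → List (List String)
  | 0 => [[]]
  | n + 1 => (pvProduct primes n).flatMap (fun t => primes.map (fun d => t ++ [d]))

-- hand port of int(s): exact for the nonempty all-digit strings it is applied to here
-- (every joined tuple consists only of the digit characters '2','3','5','7')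
def pvAtoi (cs : List Char) : Int :=
  cs.foldl (fun acc c => 10 * acc + ((c.toNat : Int) - 48)) 0

def gen_prime_digs (a : Int) (b : Int) : List Int :=
  let PRIMES : List String := ["2", "3", "5", "7"]
  (PySem.List.pyRange (PySem.Str.len (PySem.Int.toStr a)) (PySem.Str.len (PySem.Int.toStr b) + 1)).foldl
    (fun nums i =>
      (pvProduct PRIMES i.toNat).foldl   -- i ≥ len(str(a)) ≥ 1 ≥ 0, so .toNat is exact
        (fun nums j =>
          let num := pvAtoi ((j.map String.toList).flatten)   -- int(''.join(j))
          if a ≤ num ∧ num < b then nums ++ [num] else nums)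
        nums)
    []

-- ===== PORT B =====
def gen_prime_digs_alt (a : Int) (b : Int) : List Int :=
  ((PySem.List.pyRange 0 (PySem.Str.len (PySem.Int.toStr b))).foldl
    (fun (st : List Int × List Int) _ =>
      let layer := st.1.flatMap (fun x => [2, 3, 5, 7].map (fun d => 10 * x + d))
      (layer, st.2 ++ layer.filter (fun x => decide (a ≤ x ∧ x < b))))
    ([0], [])).2

-- ===== PRECONDITION & SPEC =====
-- Pre_ excludes the inputs with a < 0 and b > 2 — outside the kata's natural domain of
-- nonnegative range bounds — where A's digit-length loop starts at len(str(a)) ≥ 2 (the '-'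
-- sign counts as a character) and so omits every shorter prime-digit number (e.g. A (-1) 3
-- = []), an accident of A's implementation that B (which returns the full list, e.g. [2]
-- there) does not copy.
def Pre_gen_prime_digs (a : Int) (b : Int) : Prop := 0 ≤ a ∨ b ≤ 2
instance (a : Int) (b : Int) : Decidable (Pre_gen_prime_digs a b) := by unfold Pre_gen_prime_digs; infer_instance

def pvWitness_gen_prime_digs : Int × Int := (2, 40)

def Spec_gen_prime_digs (a : Int) (b : Int) (out : List Int) : Prop := out = gen_prime_digs_alt a b
instance (a : Int) (b : Int) (out : List Int) : Decidable (Spec_gen_prime_digs a b out) := by unfold Spec_gen_prime_digs; infer_instance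

-- ===== CLAIM (what is proved, stated in full; the proofs are below) =====
def Claim_equal_gen_prime_digs : Prop := ∀ (a : Int) (b : Int), Dom_gen_prime_digs a b → Pre_gen_prime_digs a b → Spec_gen_prime_digs a b (gen_prime_digs a b)

-- ===== LEMMAS AND PROOFS =====

-- the numeric layers: pvDigs n = all n-digit prime-digit numbers, ascending
def pvExt (l : List Int) : List Int := l.flatMap (fun x => [10*x+2, 10*x+3, 10*x+5, 10*x+7])
def pvDigs : Nat → List Int
  | 0 => [0]
  | n + 1 => pvExt (pvDigs n)

def pvG (a b : Int) (i : Nat) : List Int := (pvDigs i).filter (fun x => decide (a ≤ x ∧ x < b))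
def pvH (a b : Int) (lo n : Nat) : List Int := (List.range n).flatMap (fun k => pvG a b (lo + k))

lemma pvAtoi_append (cs : List Char) (c : Char) :
    pvAtoi (cs ++ [c]) = 10 * pvAtoi cs + ((c.toNat : Int) - 48) := by
  simp [pvAtoi, List.foldl_append]

lemma pvProduct_val (n : Nat) :
    (pvProduct ["2", "3", "5", "7"] n).map (fun j => pvAtoi ((j.map String.toList).flatten)) = pvDigs n := by
  induction n with
  | zero => simp [pvProduct, pvDigs, pvAtoi]
  | succ n ih =>
    have hd : pvDigs (n+1) = pvExt (pvDigs n) := rfl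
    rw [hd, ← ih]
    simp only [pvProduct, List.map_flatMap, pvExt, List.flatMap_map]
    apply List.flatMap_congr
    intro t _
    simp [pvAtoi_append]

lemma A_norm (a b : Int) :
    gen_prime_digs a b
      = pvH a b (PySem.Int.toChars a).length
          ((((PySem.Int.toChars b).length : Int) + 1 - ((PySem.Int.toChars a).length : Int)).toNat) := by
  have inner : ∀ (i : Int) (nums : List Int),
      (pvProduct ["2", "3", "5", "7"] i.toNat).foldl
        (fun nums j =>
          let num := pvAtoi ((j.map String.toList).flatten)
          if a ≤ num ∧ num < b then nums ++ [num] else nums)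
        nums
      = nums ++ pvG a b i.toNat := by
    intro i nums
    show (pvProduct ["2", "3", "5", "7"] i.toNat).foldl
        (fun nums j =>
          if a ≤ pvAtoi ((j.map String.toList).flatten) ∧ pvAtoi ((j.map String.toList).flatten) < b
          then nums ++ [pvAtoi ((j.map String.toList).flatten)] else nums)
        nums
      = nums ++ pvG a b i.toNat
    rw [PySem.List.foldl_append_ite
        (fun (j : List String) => a ≤ pvAtoi ((j.map String.toList).flatten) ∧ pvAtoi ((j.map String.toList).flatten) < b)
        (fun (j : List String) => pvAtoi ((j.map String.toList).flatten))]
    rw [pvG, ← pvProduct_val i.toNat, List.filter_map]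
    rfl
  unfold gen_prime_digs
  rw [PySem.List.foldl_congr_mem _ _ (fun nums i => nums ++ pvG a b i.toNat) _
      (fun nums i _ => inner i nums)]
  rw [PySem.List.foldl_append_eq_flatMap, PySem.List.pyRange_one, List.flatMap_map]
  rw [List.nil_append, PySem.Str.len_eq, PySem.Str.len_eq, PySem.Int.toList_toStr, PySem.Int.toList_toStr]
  apply List.flatMap_congr
  intro k _
  have hk : (((PySem.Int.toChars a).length : Int) + (k : Int)).toNat = (PySem.Int.toChars a).length + k := by
    omega
  rw [hk]

lemma B_fold (a b : Int) (l : List Int) : ∀ (k : Nat) (acc : List Int),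
    l.foldl
      (fun (st : List Int × List Int) _ =>
        let layer := st.1.flatMap (fun x => [2, 3, 5, 7].map (fun d => 10 * x + d))
        (layer, st.2 ++ layer.filter (fun x => decide (a ≤ x ∧ x < b))))
      (pvDigs k, acc)
    = (pvDigs (k + l.length), acc ++ (List.range l.length).flatMap (fun t => pvG a b (k + 1 + t))) := by
  induction l with
  | nil => intro k acc; simp
  | cons y l ih =>
    intro k acc
    simp only [List.foldl_cons]
    have h1 : List.flatMap (fun x => List.map (fun d => 10 * x + d) [2, 3, 5, 7]) (pvDigs k)
        = pvDigs (k + 1) := rfl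
    rw [h1]
    have h2 : List.filter (fun x => decide (a ≤ x ∧ x < b)) (pvDigs (k + 1)) = pvG a b (k + 1) := rfl
    rw [h2, ih (k + 1)]
    simp only [Prod.mk.injEq]
    constructor
    · congr 1
      simp
      omega
    · rw [List.append_assoc]
      congr 1
      rw [List.length_cons, List.range_succ_eq_map, List.flatMap_cons, List.flatMap_map]
      congr 1
      apply List.flatMap_congr
      intro t _
      congr 1
      omega

lemma B_norm (a b : Int) :
    gen_prime_digs_alt a b = pvH a b 1 (PySem.Int.toChars b).length := by
  unfold gen_prime_digs_alt
  rw [PySem.Str.len_eq, PySem.Int.toList_toStr]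
  rw [show (([0], []) : List Int × List Int) = ((pvDigs 0 : List Int), ([] : List Int)) from rfl]
  rw [B_fold]
  simp [pvH, PySem.List.length_pyRange_one]

lemma pvDigs_bounds (n : Nat) (x : Int) (hx : x ∈ pvDigs n) : 0 ≤ x ∧ x < 10 ^ n := by
  induction n generalizing x with
  | zero => simp [pvDigs] at hx; omega
  | succ n ih =>
    simp only [pvDigs, pvExt, List.mem_flatMap] at hx
    obtain ⟨y, hy, hx⟩ := hx
    have := ih y hy
    have h10 : (10:Int) ^ (n+1) = 10 * 10 ^ n := by ring
    simp [List.mem_cons] at hx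
    rcases hx with h | h | h | h <;> (subst h; constructor <;> omega)

lemma pvDigs_ge_two (n : Nat) (x : Int) (hx : x ∈ pvDigs (n + 1)) : 2 ≤ x := by
  simp only [pvDigs, pvExt, List.mem_flatMap] at hx
  obtain ⟨y, hy, hx⟩ := hx
  have := pvDigs_bounds n y hy
  simp [List.mem_cons] at hx
  rcases hx with h | h | h | h <;> omega

lemma pvG_empty_of_le (a b : Int) (i : Nat) (h : (10:Int) ^ i ≤ a) : pvG a b i = [] := by
  apply List.filter_eq_nil_iff.2
  intro x hx
  have := pvDigs_bounds i x hx
  simp only [decide_eq_true_eq]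
  omega

lemma pvG_empty_of_b_le (a b : Int) (i : Nat) (hi : 1 ≤ i) (hb : b ≤ 2) : pvG a b i = [] := by
  obtain ⟨m, rfl⟩ : ∃ m, i = m + 1 := ⟨i - 1, by omega⟩
  apply List.filter_eq_nil_iff.2
  intro x hx
  have := pvDigs_ge_two m x hx
  simp only [decide_eq_true_eq]
  omega

lemma pvH_append (a b : Int) (lo m n : Nat) :
    pvH a b lo (m + n) = pvH a b lo m ++ pvH a b (lo + m) n := by
  simp [pvH, List.range_add, List.flatMap_append, List.flatMap_map,
    Nat.add_assoc]

lemma pvH_empty (a b : Int) (lo n : Nat) (h : ∀ k, k < n → pvG a b (lo + k) = []) :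
    pvH a b lo n = [] := by
  simp only [pvH, List.flatMap_eq_nil_iff]
  intro k hk
  exact h k (List.mem_range.mp hk)

lemma len_toChars_pos (a : Int) : 1 ≤ (PySem.Int.toChars a).length := by
  unfold PySem.Int.toChars
  split
  · simp
  · exact Nat.length_toDigits_pos

lemma pow_le_of_lt_len (a : Int) (ha : 0 ≤ a) (i : Nat) (hi : 0 < i)
    (h : i < (PySem.Int.toChars a).length) : (10:Int) ^ i ≤ a := by
  have hch : PySem.Int.toChars a = Nat.toDigits 10 a.toNat := by
    unfold PySem.Int.toChars
    rw [if_neg (by omega)]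
  rw [hch] at h
  have : ¬ (a.toNat < 10 ^ i) := by
    intro hlt
    have := (Nat.length_toDigits_le_iff (b := 10) (n := a.toNat) (k := i) (by norm_num) hi).2 hlt
    omega
  have h2 : (10:Int) ^ i = ((10 ^ i : Nat) : Int) := by push_cast; ring
  omega

-- ===== VERDICT (by name: the statement is the Claim_ definition above) =====
theorem gen_prime_digs_spec : Claim_equal_gen_prime_digs := by
  intro a b _ hP
  unfold Pre_gen_prime_digs at hP
  rw [Spec_gen_prime_digs, A_norm, B_norm]
  have hLa1 : 1 ≤ (PySem.Int.toChars a).length := len_toChars_pos a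
  by_cases hb : b ≤ 2
  · rw [pvH_empty a b _ _ (fun k _ => pvG_empty_of_b_le a b (1 + k) (by omega) hb)]
    exact pvH_empty a b _ _ (fun k _ => pvG_empty_of_b_le a b ((PySem.Int.toChars a).length + k) (by omega) hb)
  · have ha : 0 ≤ a := by
      rcases hP with h | h
      · exact h
      · exact absurd h hb
    have hempty : ∀ i, 0 < i → i < (PySem.Int.toChars a).length → pvG a b i = [] :=
      fun i hi1 hi2 => pvG_empty_of_le a b i (pow_le_of_lt_len a ha i hi1 hi2)
    by_cases hle : (PySem.Int.toChars a).length ≤ (PySem.Int.toChars b).length + 1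
    · have hn : (((PySem.Int.toChars b).length : Int) + 1 - ((PySem.Int.toChars a).length : Int)).toNat
          = (PySem.Int.toChars b).length + 1 - (PySem.Int.toChars a).length := by omega
      rw [hn]
      have hsplit : (PySem.Int.toChars b).length
          = ((PySem.Int.toChars a).length - 1)
            + ((PySem.Int.toChars b).length + 1 - (PySem.Int.toChars a).length) := by omega
      conv_rhs => rw [hsplit]
      rw [pvH_append,
        pvH_empty a b 1 _ (fun k hk => hempty (1 + k) (by omega) (by omega)),
        List.nil_append]
      congr 1
      omega
    · have hn : (((PySem.Int.toChars b).length : Int) + 1 - ((PySem.Int.toChars a).length : Int)).toNat = 0 := by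
        omega
      rw [hn, show pvH a b (PySem.Int.toChars a).length 0 = [] from by simp [pvH]]
      exact (pvH_empty a b 1 _ (fun k hk => hempty (1 + k) (by omega) (by omega))).symm
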